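-- pv_equiv track=rewrite | github.com/peterellisteacher-code/Stage-2-Issues-Study2 | tools/split_long_readings.py | halve_oversized
-- ===== SOURCE A (Python) =====
-- MAX_PAGES_PER_PIECE = 90      # leave 10p margin under 100p cap
--
-- def halve_oversized(chapters):
--     """Recursively split any piece with > MAX_PAGES_PER_PIECE pages."""
--     out = []
--     for title, start, end in chapters:
--         size = end - start + 1
--         if size <= MAX_PAGES_PER_PIECE:
--             out.append((title, start, end))
--             continue
--         # Halve until each piece fits
--         mid = start + size // 2 - 1
--         out.extend(halve_oversized([
--             (f"{title} (part 1)", start, mid),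
--             (f"{title} (part 2)", mid + 1, end),
--         ]))
--     return out
-- ===== SOURCE B (Python) =====
-- MAX_PAGES_PER_PIECE = 90      # leave 10p margin under 100p cap
--
-- def halve_oversized(chapters):
--     """Iteratively split pieces level by level until every piece fits."""
--     pieces = [(t, s, e) for t, s, e in chapters]
--     while any(e - s + 1 > MAX_PAGES_PER_PIECE for _, s, e in pieces):
--         nxt = []
--         for title, s, e in pieces:
--             size = e - s + 1
--             if size <= MAX_PAGES_PER_PIECE:
--                 nxt.append((title, s, e))
--             else:
--                 mid = s + size // 2 - 1
--                 nxt.append((f"{title} (part 1)", s, mid))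
--                 nxt.append((f"{title} (part 2)", mid + 1, e))
--         pieces = nxt
--     return pieces
-- ===== Notes on version B (the rewrite author's own statement) =====
-- stated objective: alternative
-- what changed: Replaced A's depth-first recursion (each oversized chapter spawns a recursive call on a fresh two-chapter list) by an iterative breadth-first fixpoint: a while loop that repeatedly rewrites the WHOLE piece list, splitting every oversized piece once per pass, until a pass finds nothing oversized.
import Mathlib
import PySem

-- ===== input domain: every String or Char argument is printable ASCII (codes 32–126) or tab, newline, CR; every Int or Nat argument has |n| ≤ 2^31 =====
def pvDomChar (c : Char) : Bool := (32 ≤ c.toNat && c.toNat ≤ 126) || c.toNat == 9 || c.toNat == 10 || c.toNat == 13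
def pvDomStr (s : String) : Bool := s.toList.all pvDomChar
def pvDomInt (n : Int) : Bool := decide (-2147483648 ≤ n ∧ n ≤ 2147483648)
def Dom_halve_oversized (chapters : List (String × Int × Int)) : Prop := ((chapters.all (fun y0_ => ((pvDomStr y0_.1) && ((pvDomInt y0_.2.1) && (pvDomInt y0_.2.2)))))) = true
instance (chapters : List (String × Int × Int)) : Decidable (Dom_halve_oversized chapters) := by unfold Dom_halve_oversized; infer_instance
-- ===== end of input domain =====

-- B replaces A's depth-first recursion by an iterative breadth-first fixpoint
-- (one whole-list pass per loop iteration); objective: alternative algorithm.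
-- Both ports carry a fuel parameter that only bounds the loop/recursion depth
-- (a totality guard); each wrapper passes provably sufficient fuel.

-- ===== PORT A =====
-- fuel bound for A's recursion: 1 for a fitting chapter, 2*size-90 for an oversized one
def pvG (s : Int) : Nat := if s ≤ 90 then 1 else (2 * s - 90).toNat

def pvM (l : List (String × Int × Int)) : Nat :=
  (l.map (fun c => pvG (c.2.2 - c.2.1 + 1))).sum

-- A's recursion over the working list; the fuel case 0 is never reached when
-- the fuel is at least pvM of the argument (proved in pv_halve_go_spec below)
def halve_go : Nat → List (String × Int × Int) → List (String × Int × Int)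
  | _, [] => []
  | 0, l => l
  | n + 1, (title, start, «end») :: rest =>
    let size := «end» - start + 1
    if size ≤ 90 then
      (title, start, «end») :: halve_go n rest
    else
      let mid := start + PySem.Int.floordiv size 2 - 1
      halve_go n [(title ++ " (part 1)", start, mid),
                  (title ++ " (part 2)", mid + 1, «end»)]
        ++ halve_go n rest

def halve_oversized (chapters : List (String × Int × Int)) : List (String × Int × Int) :=
  halve_go (pvM chapters) chapters

-- ===== PORT B =====
-- one pass of B's while-loop body: split every oversized piece once, in place
def pvOne_pass (l : List (String × Int × Int)) : List (String × Int × Int) :=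
  l.foldl (fun nxt c =>
    let size := c.2.2 - c.2.1 + 1
    if size ≤ 90 then
      nxt ++ [(c.1, c.2.1, c.2.2)]
    else
      let mid := c.2.1 + PySem.Int.floordiv size 2 - 1
      nxt ++ [(c.1 ++ " (part 1)", c.2.1, mid), (c.1 ++ " (part 2)", mid + 1, c.2.2)]) []

-- B's while loop: repeat passes until no piece is oversized; fuel case 0 never
-- reached with fuel pvM (the loop condition fails before the fuel runs out)
def pvLoop : Nat → List (String × Int × Int) → List (String × Int × Int)
  | 0, l => l
  | n + 1, l =>
    if l.any (fun c => decide (90 < c.2.2 - c.2.1 + 1)) then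
      pvLoop n (pvOne_pass l)
    else l

def halve_oversized_alt (chapters : List (String × Int × Int)) : List (String × Int × Int) :=
  pvLoop (pvM chapters) (chapters.map (fun c => (c.1, c.2.1, c.2.2)))

-- ===== PRECONDITION & SPEC =====
def Spec_halve_oversized (chapters : List (String × Int × Int)) (out : List (String × Int × Int)) : Prop := out = halve_oversized_alt chapters
instance (chapters : List (String × Int × Int)) (out : List (String × Int × Int)) : Decidable (Spec_halve_oversized chapters out) := by unfold Spec_halve_oversized; infer_instance

-- ===== CLAIM (what is proved, stated in full; the proofs are below) =====
def Claim_equal_halve_oversized : Prop := ∀ (chapters : List (String × Int × Int)), Dom_halve_oversized chapters → Spec_halve_oversized chapters (halve_oversized chapters)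

-- ===== LEMMAS AND PROOFS =====

theorem pv_fd2 (x : Int) : PySem.Int.floordiv x 2 = x / 2 :=
  PySem.Int.floordiv_eq_ediv_of_pos (by omega)

-- proof-only common denominator: the full split of ONE chapter
def split_one_go : Nat → String → Int → Int → List (String × Int × Int)
  | 0, title, start, «end» => [(title, start, «end»)]
  | n + 1, title, start, «end» =>
    let pages := «end» - start + 1
    if pages ≤ 90 then
      [(title, start, «end»)]
    else
      let mid := start + PySem.Int.floordiv pages 2 - 1
      split_one_go n (title ++ " (part 1)") start mid
        ++ split_one_go n (title ++ " (part 2)") (mid + 1) «end»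

def split_one (title : String) (start «end» : Int) : List (String × Int × Int) :=
  split_one_go («end» - start + 1).toNat title start «end»

def splitAll (l : List (String × Int × Int)) : List (String × Int × Int) :=
  l.flatMap (fun c => split_one c.1 c.2.1 c.2.2)

theorem split_one_go_stable (n m : Nat) (title : String) (start «end» : Int)
    (hn : («end» - start + 1).toNat ≤ n) (hm : («end» - start + 1).toNat ≤ m) :
    split_one_go n title start «end» = split_one_go m title start «end» := by
  induction n generalizing m title start «end» with
  | zero =>
    have h90 : «end» - start + 1 ≤ 90 := by omega
    cases m with
    | zero => rfl
    | succ m => simp [split_one_go, h90]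
  | succ n ih =>
    by_cases h90 : «end» - start + 1 ≤ 90
    · cases m with
      | zero => simp [split_one_go, h90]
      | succ m => simp [split_one_go, h90]
    · have hbig : 91 ≤ «end» - start + 1 := by omega
      cases m with
      | zero => omega
      | succ m =>
        simp only [split_one_go, if_neg h90]
        rw [ih m, ih m]
        all_goals rw [pv_fd2]; omega

theorem split_one_unfold (title : String) (start «end» : Int) :
    split_one title start «end» =
      if «end» - start + 1 ≤ 90 then [(title, start, «end»)]
      else
        split_one (title ++ " (part 1)") start (start + PySem.Int.floordiv («end» - start + 1) 2 - 1)
          ++ split_one (title ++ " (part 2)") (start + PySem.Int.floordiv («end» - start + 1) 2) «end» := by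
  by_cases h90 : «end» - start + 1 ≤ 90
  · unfold split_one
    cases hn : («end» - start + 1).toNat with
    | zero => simp [split_one_go, h90]
    | succ n => simp [split_one_go, h90]
  · have hbig : 91 ≤ «end» - start + 1 := by omega
    obtain ⟨k, hk⟩ : ∃ k, («end» - start + 1).toNat = k + 1 := ⟨(«end» - start + 1).toNat - 1, by omega⟩
    rw [if_neg h90]
    unfold split_one
    rw [hk]
    simp only [split_one_go, if_neg h90]
    have harg : start + PySem.Int.floordiv («end» - start + 1) 2 - 1 + 1
        = start + PySem.Int.floordiv («end» - start + 1) 2 := by omega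
    rw [harg]
    congr 1
    · exact split_one_go_stable _ _ _ _ _ (by rw [pv_fd2]; try omega) (by rw [pv_fd2]; try omega)
    · exact split_one_go_stable _ _ _ _ _ (by rw [pv_fd2]; try omega) (by rw [pv_fd2]; try omega)

theorem pvG_pos (s : Int) : 1 ≤ pvG s := by
  unfold pvG; split_ifs <;> omega

-- A side: with fuel at least pvM, A's recursion computes splitAll
theorem pv_halve_go_spec (n : Nat) (l : List (String × Int × Int)) (h : pvM l ≤ n) :
    halve_go n l = splitAll l := by
  induction n generalizing l with
  | zero =>
    cases l with
    | nil => rfl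
    | cons c rest =>
      exfalso
      have h1 := pvG_pos (c.2.2 - c.2.1 + 1)
      simp [pvM] at h
      omega
  | succ n ih =>
    cases l with
    | nil => rfl
    | cons c rest =>
      obtain ⟨title, start, «end»⟩ := c
      have hrest : pvM rest ≤ n := by
        have h1 := pvG_pos («end» - start + 1)
        simp [pvM] at h ⊢
        omega
      by_cases h90 : «end» - start + 1 ≤ 90
      · simp only [halve_go, if_pos h90]
        rw [ih rest hrest]
        conv_rhs => rw [splitAll, List.flatMap_cons, split_one_unfold]
        simp [splitAll, h90]
      · have hbig : 91 ≤ «end» - start + 1 := by omega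
        have hfd : PySem.Int.floordiv («end» - start + 1) 2 = («end» - start + 1) / 2 := pv_fd2 _
        have hpair :
            pvM [(title ++ " (part 1)", start, start + PySem.Int.floordiv («end» - start + 1) 2 - 1),
                 (title ++ " (part 2)", start + PySem.Int.floordiv («end» - start + 1) 2 - 1 + 1, «end»)] ≤ n := by
          simp only [pvM, List.map, List.sum_cons, List.sum_nil, pvG] at h ⊢
          rw [hfd] at *
          split_ifs at h ⊢ <;> omega
        simp only [halve_go, if_neg h90]
        rw [ih _ hpair, ih rest hrest]
        conv_rhs => rw [splitAll, List.flatMap_cons, split_one_unfold]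
        simp only [if_neg h90]
        simp [splitAll]

-- B side
def pvStep (c : String × Int × Int) : List (String × Int × Int) :=
  if c.2.2 - c.2.1 + 1 ≤ 90 then [(c.1, c.2.1, c.2.2)]
  else
    [(c.1 ++ " (part 1)", c.2.1, c.2.1 + PySem.Int.floordiv (c.2.2 - c.2.1 + 1) 2 - 1),
     (c.1 ++ " (part 2)", c.2.1 + PySem.Int.floordiv (c.2.2 - c.2.1 + 1) 2 - 1 + 1, c.2.2)]

theorem pv_one_pass_aux (l : List (String × Int × Int)) (acc : List (String × Int × Int)) :
    List.foldl (fun nxt c =>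
      let size := c.2.2 - c.2.1 + 1
      if size ≤ 90 then
        nxt ++ [(c.1, c.2.1, c.2.2)]
      else
        let mid := c.2.1 + PySem.Int.floordiv size 2 - 1
        nxt ++ [(c.1 ++ " (part 1)", c.2.1, mid), (c.1 ++ " (part 2)", mid + 1, c.2.2)]) acc l
    = acc ++ l.flatMap pvStep := by
  induction l generalizing acc with
  | nil => simp
  | cons c rest ih =>
    rw [List.foldl_cons, ih, List.flatMap_cons]
    by_cases h : c.2.2 - c.2.1 + 1 ≤ 90 <;> simp [pvStep, h]

theorem pv_one_pass_eq (l : List (String × Int × Int)) :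
    pvOne_pass l = l.flatMap pvStep := by
  unfold pvOne_pass
  exact pv_one_pass_aux l []

theorem pv_splitAll_append (a b : List (String × Int × Int)) :
    splitAll (a ++ b) = splitAll a ++ splitAll b := by
  simp [splitAll]

theorem pv_splitAll_step (c : String × Int × Int) :
    splitAll (pvStep c) = split_one c.1 c.2.1 c.2.2 := by
  unfold pvStep
  by_cases h : c.2.2 - c.2.1 + 1 ≤ 90
  · rw [if_pos h]
    simp [splitAll]
  · rw [if_neg h]
    conv_rhs => rw [split_one_unfold]
    rw [if_neg h]
    simp [splitAll]

theorem pv_splitAll_one_pass (l : List (String × Int × Int)) :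
    splitAll (pvOne_pass l) = splitAll l := by
  rw [pv_one_pass_eq]
  induction l with
  | nil => rfl
  | cons c rest ih =>
    rw [List.flatMap_cons, pv_splitAll_append, pv_splitAll_step]
    have hcons : splitAll (c :: rest) = split_one c.1 c.2.1 c.2.2 ++ splitAll rest := by
      simp [splitAll]
    rw [hcons, ih]

theorem pv_splitAll_fits (l : List (String × Int × Int))
    (h : ∀ c ∈ l, c.2.2 - c.2.1 + 1 ≤ 90) : splitAll l = l := by
  induction l with
  | nil => rfl
  | cons c rest ih =>
    have hc := h c (by simp)
    rw [splitAll, List.flatMap_cons, split_one_unfold, if_pos hc]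
    have := ih (fun x hx => h x (by simp [hx]))
    simpa [splitAll] using congrArg (fun t => (c.1, c.2.1, c.2.2) :: t) this

theorem pvM_cons (c : String × Int × Int) (l : List (String × Int × Int)) :
    pvM (c :: l) = pvG (c.2.2 - c.2.1 + 1) + pvM l := by
  simp [pvM]

theorem pvM_append (a b : List (String × Int × Int)) : pvM (a ++ b) = pvM a + pvM b := by
  simp [pvM]

theorem pvM_step_le (c : String × Int × Int) : pvM (pvStep c) ≤ pvG (c.2.2 - c.2.1 + 1) := by
  unfold pvStep
  by_cases h : c.2.2 - c.2.1 + 1 ≤ 90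
  · rw [if_pos h]
    simp only [pvM, List.map, List.sum_cons, List.sum_nil]
    unfold pvG
    split_ifs <;> omega
  · rw [if_neg h]
    have hfd := pv_fd2 (c.2.2 - c.2.1 + 1)
    simp only [pvM, List.map, List.sum_cons, List.sum_nil]
    unfold pvG
    rw [hfd]
    split_ifs <;> omega

theorem pvM_step_lt (c : String × Int × Int) (h : ¬ c.2.2 - c.2.1 + 1 ≤ 90) :
    pvM (pvStep c) < pvG (c.2.2 - c.2.1 + 1) := by
  unfold pvStep
  rw [if_neg h]
  have hfd := pv_fd2 (c.2.2 - c.2.1 + 1)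
  simp only [pvM, List.map, List.sum_cons, List.sum_nil]
  unfold pvG
  rw [hfd]
  split_ifs <;> omega

theorem pvM_flatMap_le (l : List (String × Int × Int)) :
    pvM (l.flatMap pvStep) ≤ pvM l := by
  induction l with
  | nil => simp [pvM]
  | cons c rest ih =>
    rw [List.flatMap_cons, pvM_append, pvM_cons]
    have := pvM_step_le c
    omega

theorem pvM_one_pass_lt (l : List (String × Int × Int))
    (h : ∃ c ∈ l, ¬ c.2.2 - c.2.1 + 1 ≤ 90) : pvM (pvOne_pass l) < pvM l := by
  rw [pv_one_pass_eq]
  revert h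
  induction l with
  | nil => intro h; simp at h
  | cons c rest ih =>
    intro h
    have hc := pvM_step_le c
    have hr := pvM_flatMap_le rest
    rw [List.flatMap_cons, pvM_append, pvM_cons]
    obtain ⟨d, hd, hbig⟩ := h
    rcases List.mem_cons.mp hd with h1 | h1
    · subst h1
      have := pvM_step_lt d hbig
      omega
    · have := ih ⟨d, h1, hbig⟩
      omega

theorem pv_loop_spec (n : Nat) (l : List (String × Int × Int)) (h : pvM l ≤ n) :
    pvLoop n l = splitAll l := by
  induction n generalizing l with
  | zero =>
    cases l with
    | nil => rfl
    | cons c rest =>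
      exfalso
      have h1 := pvG_pos (c.2.2 - c.2.1 + 1)
      simp [pvM] at h
      omega
  | succ n ih =>
    by_cases hany : l.any (fun c => decide (90 < c.2.2 - c.2.1 + 1)) = true
    · have hex : ∃ c ∈ l, ¬ c.2.2 - c.2.1 + 1 ≤ 90 := by
        rcases List.any_eq_true.mp hany with ⟨c, hc, hbig⟩
        exact ⟨c, hc, by simpa using of_decide_eq_true hbig⟩
      have hlt := pvM_one_pass_lt l hex
      simp only [pvLoop, hany, if_true]
      rw [ih _ (by omega), pv_splitAll_one_pass]
    · have hall : ∀ c ∈ l, c.2.2 - c.2.1 + 1 ≤ 90 := by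
        intro c hc
        by_contra hbig
        exact hany (List.any_eq_true.mpr ⟨c, hc, by simp; omega⟩)
      simp only [pvLoop, hany]
      exact (pv_splitAll_fits l hall).symm

theorem pv_map_id (l : List (String × Int × Int)) :
    l.map (fun c => (c.1, c.2.1, c.2.2)) = l := by
  simp

-- ===== VERDICT (by name: the statement is the Claim_ definition above) =====
theorem halve_oversized_spec : Claim_equal_halve_oversized := by
  intro chapters _
  unfold Spec_halve_oversized
  rw [halve_oversized, pv_halve_go_spec _ _ le_rfl,
      halve_oversized_alt, pv_map_id, pv_loop_spec _ _ le_rfl]
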